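-- pv_equiv track=rewrite | github.com/BrianFlores7/filterRepeatedPasswords | password.py | rejectOrAcceptAllWithPassword
-- ===== SOURCE A (Python) =====
-- def rejectOrAcceptAllWithPassword(passwords, k, password, repeated_passwords):
--     ACCEPT = "ACCEPT"
--     REJECT = "REJECT"
--     for i in range(len(passwords)):
--                     if password == passwords[i] and k > repeated_passwords:
--                         passwords[i] = ACCEPT
--                         repeated_passwords += 1
--
--                     elif password == passwords[i]:
--                         passwords[i] = REJECT
--                         repeated_passwords += 1
--
--     return passwords
-- ===== SOURCE B (Python) =====
-- def rejectOrAcceptAllWithPassword(passwords, k, password, repeated_passwords):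
--     matches = [i for i, p in enumerate(passwords) if p == password]
--     allowed = k - repeated_passwords
--     for j, i in enumerate(matches):
--         passwords[i] = "ACCEPT" if j < allowed else "REJECT"
--     return passwords
-- ===== Notes on version B (the rewrite author's own statement) =====
-- stated objective: alternative
-- what changed: Replaces A's single stateful pass that branches on a running counter with two passes: first collect the indices of matching entries, then classify each match by its position against allowed = k - repeated_passwords.
import Mathlib
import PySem

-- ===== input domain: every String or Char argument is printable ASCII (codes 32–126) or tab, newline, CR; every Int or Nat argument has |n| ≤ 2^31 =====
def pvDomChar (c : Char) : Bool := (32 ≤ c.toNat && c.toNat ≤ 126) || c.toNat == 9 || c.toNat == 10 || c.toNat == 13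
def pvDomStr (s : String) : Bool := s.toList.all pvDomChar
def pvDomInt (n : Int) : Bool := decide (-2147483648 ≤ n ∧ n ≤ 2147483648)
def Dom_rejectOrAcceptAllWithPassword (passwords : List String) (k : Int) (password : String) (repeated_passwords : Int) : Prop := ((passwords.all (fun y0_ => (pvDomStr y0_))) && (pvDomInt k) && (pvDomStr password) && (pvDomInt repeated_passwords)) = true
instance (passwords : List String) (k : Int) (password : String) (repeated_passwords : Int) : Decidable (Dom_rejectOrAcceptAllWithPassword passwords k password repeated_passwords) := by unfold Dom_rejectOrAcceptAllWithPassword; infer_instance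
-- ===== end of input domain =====

-- B replaces A's single stateful branching pass with two passes (collect matching
-- indices, then classify each by its position against k - repeated_passwords);
-- alternative decomposition, same cost. Both Pythons mutate `passwords` in place and
-- return it; the equivalence proved here is about the returned value.


-- ===== PORT A =====
-- literal transliteration of A: one pass over range(len(passwords)), mutating the
-- list and incrementing repeated_passwords as it goes (state = (list, counter))
def rejectOrAcceptAllWithPassword (passwords : List String) (k : Int) (password : String) (repeated_passwords : Int) : List String :=
  ((PySem.List.pyRange 0 (passwords.length : Int) 1).foldl
    (fun (st : List String × Int) i =>
      if password = PySem.List.pyGetD st.1 i "" ∧ k > st.2 then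
        (PySem.List.pySetD st.1 i "ACCEPT", st.2 + 1)
      else if password = PySem.List.pyGetD st.1 i "" then
        (PySem.List.pySetD st.1 i "REJECT", st.2 + 1)
      else st)
    (passwords, repeated_passwords)).1

-- ===== PORT B =====
-- literal transliteration of B: collect matching indices, then assign by position
def rejectOrAcceptAllWithPassword_alt (passwords : List String) (k : Int) (password : String) (repeated_passwords : Int) : List String :=
  let hits := ((PySem.List.enumerate passwords 0).filter (fun ip => ip.2 = password)).map (·.1)
  let allowed := k - repeated_passwords
  (PySem.List.enumerate hits 0).foldl
    (fun acc ji => PySem.List.pySetD acc ji.2 (if ji.1 < allowed then "ACCEPT" else "REJECT"))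
    passwords

-- ===== PRECONDITION & SPEC =====
def Spec_rejectOrAcceptAllWithPassword (passwords : List String) (k : Int) (password : String) (repeated_passwords : Int) (out : List String) : Prop := out = rejectOrAcceptAllWithPassword_alt passwords k password repeated_passwords
instance (passwords : List String) (k : Int) (password : String) (repeated_passwords : Int) (out : List String) : Decidable (Spec_rejectOrAcceptAllWithPassword passwords k password repeated_passwords out) := by unfold Spec_rejectOrAcceptAllWithPassword; infer_instance

-- ===== CLAIM (what is proved, stated in full; the proofs are below) =====
def Claim_equal_rejectOrAcceptAllWithPassword : Prop := ∀ (passwords : List String) (k : Int) (password : String) (repeated_passwords : Int), Dom_rejectOrAcceptAllWithPassword passwords k password repeated_passwords → Spec_rejectOrAcceptAllWithPassword passwords k password repeated_passwords (rejectOrAcceptAllWithPassword passwords k password repeated_passwords)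

-- ===== LEMMAS AND PROOFS =====

-- common reference: process the list left to right with a running match counter c
def pvGo (pw : String) (k : Int) : List String → Int → List String
  | [], _ => []
  | p :: rest, c =>
      if p = pw then (if k > c then "ACCEPT" else "REJECT") :: pvGo pw k rest (c + 1)
      else p :: pvGo pw k rest c

lemma pvA_loop (pw : String) (k : Int) (todo : List String) :
    ∀ (done : List String) (c : Int),
    ((PySem.List.pyRange (done.length : Int) ((done.length : Int) + (todo.length : Int)) 1).foldl
      (fun (st : List String × Int) i =>
        if pw = PySem.List.pyGetD st.1 i "" ∧ k > st.2 then
          (PySem.List.pySetD st.1 i "ACCEPT", st.2 + 1)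
        else if pw = PySem.List.pyGetD st.1 i "" then
          (PySem.List.pySetD st.1 i "REJECT", st.2 + 1)
        else st)
      (done ++ todo, c)).1 = done ++ pvGo pw k todo c := by
  induction todo with
  | nil =>
      intro done c
      simp [PySem.List.pyRange, pvGo]
  | cons p rest ih =>
      intro done c
      rw [PySem.List.pyRange_one_cons (by push_cast [List.length_cons]; omega)]
      have hget : PySem.List.pyGetD (done ++ p :: rest) (done.length : Int) "" = p := by
        simp [PySem.List.pyGetD_natCast]
      simp only [List.foldl_cons, hget]
      by_cases h1 : pw = p ∧ k > c
      · have hset : PySem.List.pySetD (done ++ p :: rest) (done.length : Int) "ACCEPT"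
            = (done ++ ["ACCEPT"]) ++ rest := by
          simp [PySem.List.pySetD_natCast]
        rw [if_pos h1, hset]
        have := ih (done ++ ["ACCEPT"]) (c + 1)
        simp only [List.length_append, List.length_cons, List.length_nil] at this ⊢
        push_cast at this ⊢
        rw [show (done.length : Int) + 1 + (rest.length : Int)
              = (done.length : Int) + ((rest.length : Int) + 1) by ring] at this
        rw [this]
        simp [pvGo, h1.1, h1.2]
      · rw [if_neg h1]
        by_cases h2 : pw = p
        · have hc : ¬ k > c := fun hk => h1 ⟨h2, hk⟩
          have hset : PySem.List.pySetD (done ++ p :: rest) (done.length : Int) "REJECT"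
              = (done ++ ["REJECT"]) ++ rest := by
            simp [PySem.List.pySetD_natCast]
          rw [if_pos h2, hset]
          have := ih (done ++ ["REJECT"]) (c + 1)
          simp only [List.length_append, List.length_cons, List.length_nil] at this ⊢
          push_cast at this ⊢
          rw [show (done.length : Int) + 1 + (rest.length : Int)
                = (done.length : Int) + ((rest.length : Int) + 1) by ring] at this
          rw [this]
          simp [pvGo, h2, hc]
        · rw [if_neg h2]
          have heq : done ++ p :: rest = (done ++ [p]) ++ rest := by simp
          rw [heq]
          have := ih (done ++ [p]) c
          simp only [List.length_append, List.length_cons, List.length_nil] at this ⊢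
          push_cast at this ⊢
          rw [show (done.length : Int) + 1 + (rest.length : Int)
                = (done.length : Int) + ((rest.length : Int) + 1) by ring] at this
          rw [this]
          have h2' : ¬ p = pw := fun h => h2 (h.symm)
          simp [pvGo, h2']

lemma pvB_loop (pw : String) (k rp : Int) (ps : List String) :
    ∀ (done : List String) (j0 : Int),
    (PySem.List.enumerate
        (((PySem.List.enumerate ps (done.length : Int)).filter (fun ip => ip.2 = pw)).map (·.1)) j0).foldl
      (fun acc ji => PySem.List.pySetD acc ji.2 (if ji.1 < k - rp then "ACCEPT" else "REJECT"))
      (done ++ ps) = done ++ pvGo pw k ps (rp + j0) := by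
  induction ps with
  | nil =>
      intro done j0
      simp [PySem.List.enumerate, pvGo]
  | cons p rest ih =>
      intro done j0
      by_cases h2 : p = pw
      · have hfil :
            ((PySem.List.enumerate (p :: rest) (done.length : Int)).filter (fun ip => ip.2 = pw)).map (·.1)
            = (done.length : Int) ::
              ((PySem.List.enumerate rest ((done.length : Int) + 1)).filter (fun ip => ip.2 = pw)).map (·.1) := by
          rw [PySem.List.enumerate_cons]
          simp [h2]
        rw [hfil, PySem.List.enumerate_cons]
        simp only [List.foldl_cons]
        have hset : PySem.List.pySetD (done ++ p :: rest) (done.length : Int)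
            (if j0 < k - rp then "ACCEPT" else "REJECT")
            = (done ++ [if j0 < k - rp then "ACCEPT" else "REJECT"]) ++ rest := by
          simp [PySem.List.pySetD_natCast]
        rw [hset]
        have := ih (done ++ [if j0 < k - rp then "ACCEPT" else "REJECT"]) (j0 + 1)
        simp only [List.length_append, List.length_cons, List.length_nil] at this ⊢
        push_cast at this ⊢
        rw [this]
        have hcond : (j0 < k - rp) = (k > rp + j0) := by
          apply propext; constructor <;> intro <;> omega
        simp [pvGo, h2, hcond, show rp + (j0 + 1) = rp + j0 + 1 by ring]
      · have hfil :
            ((PySem.List.enumerate (p :: rest) (done.length : Int)).filter (fun ip => ip.2 = pw)).map (·.1)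
            = ((PySem.List.enumerate rest ((done.length : Int) + 1)).filter (fun ip => ip.2 = pw)).map (·.1) := by
          rw [PySem.List.enumerate_cons]
          simp [h2]
        rw [hfil]
        have heq : done ++ p :: rest = (done ++ [p]) ++ rest := by simp
        rw [heq]
        have := ih (done ++ [p]) j0
        simp only [List.length_append, List.length_cons, List.length_nil] at this ⊢
        push_cast at this ⊢
        rw [this]
        simp [pvGo, h2]

-- ===== VERDICT (by name: the statement is the Claim_ definition above) =====
theorem rejectOrAcceptAllWithPassword_spec : Claim_equal_rejectOrAcceptAllWithPassword := by
  intro passwords k password repeated_passwords _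
  unfold Spec_rejectOrAcceptAllWithPassword rejectOrAcceptAllWithPassword rejectOrAcceptAllWithPassword_alt
  have hA := pvA_loop password k passwords [] repeated_passwords
  have hB := pvB_loop password k repeated_passwords passwords [] 0
  simp only [List.length_nil, Nat.cast_zero, List.nil_append, zero_add, add_zero] at hA hB
  rw [hA, hB]
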